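-- pv_equiv track=rewrite | github.com/axkoenig/axkoenig.github.io | scripts/build.py | _parse_resources_list
-- ===== SOURCE A (Python) =====
-- def _yaml_value(s: str) -> str:
--     """Extract value from YAML-like string; handle quoted values containing colons."""
--     s = s.strip()
--     if not s:
--         return s
--     if s[0] in "\"'" and len(s) > 1:
--         end = s[0]
--         i = 1
--         while i < len(s):
--             if s[i] == "\\" and i + 1 < len(s):
--                 i += 2
--                 continue
--             if s[i] == end:
--                 return s[1:i].replace("\\\"", '"').replace("\\'", "'")
--             i += 1
--     return s.strip('"\'') if s else s
--
-- def _parse_resources_list(lines: list[str], start_i: int, indent: int) -> tuple[list[dict[str, str]], int]: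
--     """Parse YAML-like resources list; return (list of {label, url}, index after list)."""
--     resources: list[dict[str, str]] = []
--     i = start_i
--     item: dict[str, str] = {}
--     while i < len(lines):
--         line = lines[i]
--         strip = line.strip()
--         if not strip:
--             i += 1
--             continue
--         line_indent = len(line) - len(line.lstrip())
--         if line_indent < indent and strip:
--             break
--         if strip.startswith("- ") and line_indent >= indent:
--             if item:
--                 resources.append(item)
--             item = {}
--             rest = strip[2:].strip()
--             if ":" in rest:
--                 k, _, v = rest.partition(":")
--                 current_key = k.strip()
--                 item[current_key] = _yaml_value(v)
--         elif line_indent >= indent + 2 and ":" in strip and item: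
--             k, _, v = strip.partition(":")
--             item[k.strip()] = _yaml_value(v)
--         i += 1
--     if item:
--         resources.append(item)
--     return resources, i
-- ===== SOURCE B (Python) =====
-- def _yaml_value(s: str) -> str:
--     """Extract value from YAML-like string; handle quoted values containing colons."""
--     s = s.strip()
--     if not s:
--         return s
--     if s[0] in "\"'" and len(s) > 1:
--         end = s[0]
--         i = 1
--         while i < len(s):
--             if s[i] == "\\" and i + 1 < len(s):
--                 i += 2
--                 continue
--             if s[i] == end:
--                 return s[1:i].replace("\\\"", '"').replace("\\'", "'")
--             i += 1
--     return s.strip('"\'') if s else s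
--
-- def _parse_resources_list(lines, start_i, indent):
--     # Pass 1: scan to the list's end, collecting (indent, stripped) of non-blank lines.
--     n = len(lines)
--     body = []
--     i = start_i
--     while i < n:
--         line = lines[i]
--         s = line.strip()
--         if s:
--             ind = len(line) - len(line.lstrip())
--             if ind < indent:
--                 break
--             body.append((ind, s))
--         i += 1
--     # Pass 2: partition the body into item blocks (marker line + following key lines);
--     # lines before the first marker are discarded.
--     blocks = []
--     cur = None
--     for ind, s in body:
--         if s.startswith("- "):
--             if cur is not None:
--                 blocks.append(cur)
--             cur = ((ind, s), [])
--         elif cur is not None: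
--             cur[1].append((ind, s))
--     if cur is not None:
--         blocks.append(cur)
--     # Pass 3: turn each block into a dict; a marker without 'key: value' yields nothing.
--     resources = []
--     for (_mind, ms), keys in blocks:
--         k, sep, v = ms[2:].strip().partition(":")
--         if not sep:
--             continue
--         item = {k.strip(): _yaml_value(v)}
--         for ind, s in keys:
--             if ind >= indent + 2 and ":" in s:
--                 k2, _, v2 = s.partition(":")
--                 item[k2.strip()] = _yaml_value(v2)
--         resources.append(item)
--     return resources, i
-- ===== Notes on version B (the rewrite author's own statement) =====
-- stated objective: alternative
-- what changed: A's single stateful line-by-line scan (carrying resources/item across iterations) is replaced by three passes: scan to the list's end collecting non-blank (indent, stripped) lines, partition them into item blocks (marker line + following key lines), then map each block to its dict independently.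
import Mathlib
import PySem

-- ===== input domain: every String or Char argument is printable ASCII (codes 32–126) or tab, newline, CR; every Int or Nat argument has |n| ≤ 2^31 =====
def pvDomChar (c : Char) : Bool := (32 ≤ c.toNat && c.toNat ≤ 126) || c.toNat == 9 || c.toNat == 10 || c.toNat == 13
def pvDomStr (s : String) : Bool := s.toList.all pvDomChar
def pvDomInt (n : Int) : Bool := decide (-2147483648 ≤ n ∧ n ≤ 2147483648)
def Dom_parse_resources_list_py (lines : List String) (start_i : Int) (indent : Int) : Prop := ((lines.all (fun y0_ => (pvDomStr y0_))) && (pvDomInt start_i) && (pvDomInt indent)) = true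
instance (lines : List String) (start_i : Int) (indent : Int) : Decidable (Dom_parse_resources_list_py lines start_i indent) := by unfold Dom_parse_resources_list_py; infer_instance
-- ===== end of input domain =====

-- B replaces A's single stateful scan by three passes — scan the list's extent, partition
-- into item blocks, map blocks to dicts — a different decomposition of the same parse (objective: alternative).

-- ===== PORT A =====
abbrev SDict := PySem.Dict String String

-- port of the helper _yaml_value's inner while loop (index scan for the closing quote)
def yamlScan (s : List Char) (endq : Char) (i : Nat) : Option Nat :=
  if h : i < s.length then
    if s[i] = '\\' ∧ i + 1 < s.length then yamlScan s endq (i + 2)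
    else if s[i] = endq then some i
    else yamlScan s endq (i + 1)
  else none
termination_by s.length - i

-- hand port of str.partition(":") on its two used components, called only after an ':' in s
-- check: splits at the FIRST ':' (PySem.Chars.find is the first occurrence) — exact there
def splitColon (s : List Char) : List Char × List Char :=
  let f := (PySem.Chars.find s [':']).toNat
  (s.take f, s.drop (f + 1))

-- port of _yaml_value (shared module helper, used verbatim by both A and B)
def yamlValue (s0 : List Char) : String :=
  match PySem.Chars.strip s0 with
  | [] => ""
  | c :: t =>
    let s := c :: t
    if (c = '"' ∨ c = '\'') ∧ 1 < s.length then
      match yamlScan s c 1 with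
      | some i =>
          String.mk (PySem.Chars.replace (PySem.Chars.replace
            (PySem.List.slice s (some 1) (some (i : Int))) ['\\', '"'] ['"']) ['\\', '\''] ['\''])
      | none => String.mk (PySem.Chars.stripChars s ['"', '\''])
    else String.mk (PySem.Chars.stripChars s ['"', '\''])

-- A's while loop, state (i, resources, item); trailing 'if item: resources.append(item)' inlined at each exit
def loopA (lines : List String) (indent : Int) (i : Int) (res : List SDict) (item : SDict) : List SDict × Int :=
  if _h : i < (lines.length : Int) then
    match PySem.List.pyGet? lines i with
    | none => (if item.items ≠ [] then res ++ [item] else res, i)  -- Python raises IndexError here (only when start_i < -len(lines)); excluded by Pre_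
    | some line =>
      let strip := PySem.Chars.strip line.toList
      if strip = [] then loopA lines indent (i + 1) res item
      else
        let li : Int := (PySem.Chars.len line.toList : Int) - (PySem.Chars.len (PySem.Chars.lstrip line.toList) : Int)
        if li < indent ∧ strip ≠ [] then
          (if item.items ≠ [] then res ++ [item] else res, i)
        else if PySem.Chars.startswith strip ['-', ' '] ∧ indent ≤ li then
          let res' := if item.items ≠ [] then res ++ [item] else res
          let rest := PySem.Chars.strip (PySem.List.slice strip (some 2) none)
          let item' := if PySem.Chars.isIn [':'] rest then
              PySem.Dict.empty.insert (String.mk (PySem.Chars.strip (splitColon rest).1)) (yamlValue (splitColon rest).2)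
            else PySem.Dict.empty
          loopA lines indent (i + 1) res' item'
        else if indent + 2 ≤ li ∧ PySem.Chars.isIn [':'] strip ∧ item.items ≠ [] then
          loopA lines indent (i + 1) res (item.insert (String.mk (PySem.Chars.strip (splitColon strip).1)) (yamlValue (splitColon strip).2))
        else loopA lines indent (i + 1) res item
  else (if item.items ≠ [] then res ++ [item] else res, i)
termination_by ((lines.length : Int) - i).toNat
decreasing_by all_goals omega

def parse_resources_list_py (lines : List String) (start_i : Int) (indent : Int) : (List (List (String × String))) × Int :=
  let r := loopA lines indent start_i [] PySem.Dict.empty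
  (r.1.map (fun d => d.items), r.2)

-- ===== PORT B =====
-- pass 1: scan to the list's end, collecting (indent, stripped) of non-blank lines
def scanB (lines : List String) (indent : Int) (i : Int) (acc : List (Int × List Char)) : (List (Int × List Char)) × Int :=
  if _h : i < (lines.length : Int) then
    match PySem.List.pyGet? lines i with
    | none => (acc, i)  -- Python raises IndexError here (only when start_i < -len(lines)); excluded by Pre_
    | some line =>
      let s := PySem.Chars.strip line.toList
      if s = [] then scanB lines indent (i + 1) acc
      else
        let ind : Int := (PySem.Chars.len line.toList : Int) - (PySem.Chars.len (PySem.Chars.lstrip line.toList) : Int)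
        if ind < indent then (acc, i)
        else scanB lines indent (i + 1) (acc ++ [(ind, s)])
  else (acc, i)
termination_by ((lines.length : Int) - i).toNat
decreasing_by all_goals omega

abbrev Block := (Int × List Char) × List (Int × List Char)

-- pass 2: partition body lines into blocks (marker line, following key lines); cur = open block
def stepBlocks (st : List Block × Option Block) (p : Int × List Char) : List Block × Option Block :=
  if PySem.Chars.startswith p.2 ['-', ' '] then
    (st.1 ++ st.2.toList, some ((p.1, p.2), []))
  else
    match st.2 with
    | none => st
    | some (m, ks) => (st.1, some (m, ks ++ [p]))

def splitBlocks (body : List (Int × List Char)) : List Block :=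
  let st := body.foldl stepBlocks ([], none)
  st.1 ++ st.2.toList

-- pass 3: one key line into a block's dict
def stepKey (indent : Int) (d : SDict) (p : Int × List Char) : SDict :=
  if indent + 2 ≤ p.1 ∧ PySem.Chars.isIn [':'] p.2 then
    d.insert (String.mk (PySem.Chars.strip (splitColon p.2).1)) (yamlValue (splitColon p.2).2)
  else d

def blockToItem (indent : Int) (b : Block) : Option SDict :=
  let rest := PySem.Chars.strip (PySem.List.slice b.1.2 (some 2) none)
  if PySem.Chars.isIn [':'] rest then
    some (b.2.foldl (stepKey indent)
      (PySem.Dict.empty.insert (String.mk (PySem.Chars.strip (splitColon rest).1)) (yamlValue (splitColon rest).2)))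
  else none

def parse_resources_list_py_alt (lines : List String) (start_i : Int) (indent : Int) : (List (List (String × String))) × Int :=
  let r := scanB lines indent start_i []
  (((splitBlocks r.1).filterMap (blockToItem indent)).map (fun d => d.items), r.2)

-- ===== PRECONDITION & SPEC =====
-- Python A raises IndexError exactly when start_i < -len(lines) (negative index past the front); nothing else is excluded.
def Pre_parse_resources_list_py (lines : List String) (start_i : Int) (indent : Int) : Prop :=
  -(lines.length : Int) ≤ start_i
instance (lines : List String) (start_i : Int) (indent : Int) : Decidable (Pre_parse_resources_list_py lines start_i indent) := by unfold Pre_parse_resources_list_py; infer_instance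

def pvWitness_parse_resources_list_py : List String × Int × Int := (["- label: x", "  url: y"], 0, 0)

def Spec_parse_resources_list_py (lines : List String) (start_i : Int) (indent : Int) (out : (List (List (String × String))) × Int) : Prop := out = parse_resources_list_py_alt lines start_i indent
instance (lines : List String) (start_i : Int) (indent : Int) (out : (List (List (String × String))) × Int) : Decidable (Spec_parse_resources_list_py lines start_i indent out) := by unfold Spec_parse_resources_list_py; infer_instance

-- ===== CLAIM (what is proved, stated in full; the proofs are below) =====
def Claim_equal_parse_resources_list_py : Prop := ∀ (lines : List String) (start_i : Int) (indent : Int), Dom_parse_resources_list_py lines start_i indent → Pre_parse_resources_list_py lines start_i indent → Spec_parse_resources_list_py lines start_i indent (parse_resources_list_py lines start_i indent)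

-- ===== LEMMAS AND PROOFS =====

-- A's body processing as a structural recursion over the collected (indent, stripped) lines
def procA (indent : Int) : List SDict → SDict → List (Int × List Char) → List SDict
  | res, item, [] => if item.items ≠ [] then res ++ [item] else res
  | res, item, (ind, s) :: rest =>
    if PySem.Chars.startswith s ['-', ' '] ∧ indent ≤ ind then
      procA indent (if item.items ≠ [] then res ++ [item] else res)
        (let rest' := PySem.Chars.strip (PySem.List.slice s (some 2) none)
         if PySem.Chars.isIn [':'] rest' then
           PySem.Dict.empty.insert (String.mk (PySem.Chars.strip (splitColon rest').1)) (yamlValue (splitColon rest').2)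
         else PySem.Dict.empty) rest
    else if indent + 2 ≤ ind ∧ PySem.Chars.isIn [':'] s ∧ item.items ≠ [] then
      procA indent res (item.insert (String.mk (PySem.Chars.strip (splitColon s).1)) (yamlValue (splitColon s).2)) rest
    else procA indent res item rest

-- the dict A has open when B's open block is cur
def itemView (indent : Int) (cur : Option Block) : SDict :=
  match cur with
  | none => PySem.Dict.empty
  | some b => (blockToItem indent b).getD PySem.Dict.empty

-- splitBlocks' fold, written as a recursion
def splitBRec (cur : Option Block) : List (Int × List Char) → List Block
  | [] => cur.toList
  | p :: rest =>
    if PySem.Chars.startswith p.2 ['-', ' '] then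
      cur.toList ++ splitBRec (some ((p.1, p.2), [])) rest
    else
      splitBRec (cur.map (fun b => (b.1, b.2 ++ [p]))) rest

theorem scanB_acc (lines : List String) (indent : Int) :
    ∀ i acc, scanB lines indent i acc =
      (acc ++ (scanB lines indent i []).1, (scanB lines indent i []).2) := by
  have key : ∀ n i acc, ((lines.length : Int) - i).toNat ≤ n →
      scanB lines indent i acc = (acc ++ (scanB lines indent i []).1, (scanB lines indent i []).2) := by
    intro n
    induction n with
    | zero =>
      intro i acc h
      have hi : ¬ i < (lines.length : Int) := by omega
      conv_rhs => rw [scanB]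
      rw [scanB]
      simp [hi]
    | succ n ih =>
      intro i acc h
      conv_rhs => rw [scanB]
      rw [scanB]
      by_cases hi : i < (lines.length : Int)
      · simp only [hi, dite_true]
        cases hg : PySem.List.pyGet? lines i with
        | none => simp [hg]
        | some line =>
          simp only [hg]
          by_cases hs : PySem.Chars.strip line.toList = []
          · simp only [hs, if_pos rfl, if_true]
            rw [ih (i+1) acc (by omega)]
          · simp only [hs, if_neg, if_false, ite_false]
            split_ifs with hind
            · simp
            · rw [ih (i+1) (acc ++ [_]) (by omega), ih (i+1) ([] ++ [_]) (by omega)]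
              simp
      · simp [hi]
  intro i acc; exact key _ i acc le_rfl


theorem scanB_ge (lines : List String) (indent : Int) :
    ∀ i acc, (∀ p ∈ acc, indent ≤ p.1) →
      ∀ p ∈ (scanB lines indent i acc).1, indent ≤ p.1 := by
  have key : ∀ n i acc, ((lines.length : Int) - i).toNat ≤ n → (∀ p ∈ acc, indent ≤ p.1) →
      ∀ p ∈ (scanB lines indent i acc).1, indent ≤ p.1 := by
    intro n
    induction n with
    | zero =>
      intro i acc h hacc
      have hi : ¬ i < (lines.length : Int) := by omega
      rw [scanB]; simp only [hi, dite_false]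
      exact hacc
    | succ n ih =>
      intro i acc h hacc
      rw [scanB]
      by_cases hi : i < (lines.length : Int)
      · simp only [hi, dite_true]
        cases hg : PySem.List.pyGet? lines i with
        | none => exact hacc
        | some line =>
          by_cases hs : PySem.Chars.strip line.toList = []
          · simp only [hs, if_true]
            exact ih (i+1) acc (by omega) hacc
          · simp only [hs, if_false, ite_false]
            split_ifs with hind
            · exact hacc
            · refine ih (i+1) _ (by omega) ?_
              intro p hp
              rcases List.mem_append.mp hp with hp | hp
              · exact hacc p hp
              · rw [List.mem_singleton.mp hp]; omega
      · simp only [hi, dite_false]; exact hacc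
  intro i acc; exact key _ i acc le_rfl


theorem loopA_eq (lines : List String) (indent : Int) :
    ∀ i res item, loopA lines indent i res item =
      (procA indent res item (scanB lines indent i []).1, (scanB lines indent i []).2) := by
  have key : ∀ n i res item, ((lines.length : Int) - i).toNat ≤ n →
      loopA lines indent i res item =
        (procA indent res item (scanB lines indent i []).1, (scanB lines indent i []).2) := by
    intro n
    induction n with
    | zero =>
      intro i res item h
      have hi : ¬ i < (lines.length : Int) := by omega
      conv_rhs => rw [scanB]
      rw [loopA]
      simp [hi, procA]
    | succ n ih =>
      intro i res item h
      conv_rhs => rw [scanB]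
      rw [loopA]
      by_cases hi : i < (lines.length : Int)
      · simp only [hi, dite_true]
        cases hg : PySem.List.pyGet? lines i with
        | none => simp [hg, procA]
        | some line =>
          simp only [hg, PySem.Chars.len_eq, String.length_toList]
          by_cases hs : PySem.Chars.strip line.toList = []
          · simp only [if_pos hs]
            exact ih (i+1) res item (by omega)
          · rw [if_neg hs]
            conv_rhs => rw [if_neg hs]
            by_cases hbrk : (line.length : Int) - ((PySem.Chars.lstrip line.toList).length : Int) < indent
            · rw [if_pos (show _ ∧ _ from ⟨hbrk, hs⟩)]
              conv_rhs => rw [if_pos hbrk]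
              simp [procA]
            · have hnb : ¬((line.length : Int) - ((PySem.Chars.lstrip line.toList).length : Int) < indent ∧ PySem.Chars.strip line.toList ≠ []) := fun hc => hbrk hc.1
              rw [if_neg hnb]
              conv_rhs => rw [if_neg hbrk]
              rw [scanB_acc lines indent (i + 1) ([] ++ [_])]
              simp only [List.nil_append, List.singleton_append, procA]
              split_ifs with h1 h2 h3
              all_goals exact ih (i+1) _ _ (by omega)
      · conv_rhs => rw [scanB]
        simp [hi, procA]
  intro i res item; exact key _ i res item le_rfl

theorem foldl_stepBlocks (body : List (Int × List Char)) :
    ∀ blocks cur, (body.foldl stepBlocks (blocks, cur)).1 ++ (body.foldl stepBlocks (blocks, cur)).2.toList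
      = blocks ++ splitBRec cur body := by
  induction body with
  | nil => intro blocks cur; simp [splitBRec]
  | cons p rest ih =>
    intro blocks cur
    simp only [List.foldl_cons, splitBRec, stepBlocks]
    by_cases hm : PySem.Chars.startswith p.2 ['-', ' '] = true
    · rw [if_pos hm, if_pos hm, ih]
      simp [List.append_assoc]
    · rw [if_neg hm, if_neg hm]
      cases cur with
      | none => simpa using ih blocks none
      | some b =>
        obtain ⟨m, ks⟩ := b
        simpa using ih blocks (some (m, ks ++ [p]))

theorem insert_items_ne_nil (d : SDict) (k v : String) : (d.insert k v).items ≠ [] := by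
  rw [PySem.Dict.items_insert]
  split_ifs with h
  · intro hc
    rw [List.map_eq_nil_iff] at hc
    rw [PySem.Dict.contains_iff_mem_keys] at h
    simp only [PySem.Dict.keys, hc] at h
    simp at h
  · simp

theorem foldl_stepKey_ne_nil (indent : Int) (ks : List (Int × List Char)) :
    ∀ d : SDict, d.items ≠ [] → ((ks.foldl (stepKey indent) d).items ≠ []) := by
  induction ks with
  | nil => intro d h; simpa using h
  | cons p rest ih =>
    intro d h
    simp only [List.foldl_cons]
    apply ih
    unfold stepKey
    split_ifs with hc
    · exact insert_items_ne_nil _ _ _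
    · exact h

theorem blockToItem_ne_nil (indent : Int) (b : Block) (d : SDict)
    (h : blockToItem indent b = some d) : d.items ≠ [] := by
  simp only [blockToItem] at h
  split_ifs at h with hc
  have hd := Option.some.inj h
  subst hd
  exact foldl_stepKey_ne_nil _ _ _ (insert_items_ne_nil _ _ _)

theorem itemView_flush (indent : Int) (cur : Option Block) (res : List SDict) :
    (if (itemView indent cur).items ≠ [] then res ++ [itemView indent cur] else res)
      = res ++ cur.toList.filterMap (blockToItem indent) := by
  cases cur with
  | none => simp [itemView, PySem.Dict.empty]
  | some b =>
    cases hb : blockToItem indent b with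
    | none => simp [itemView, hb, PySem.Dict.empty]
    | some d => simp [itemView, hb, blockToItem_ne_nil indent b d hb]

theorem itemView_push (indent : Int) (cur : Option Block) (ind : Int) (s : List Char) :
    itemView indent (cur.map (fun b => (b.1, b.2 ++ [(ind, s)])))
      = if indent + 2 ≤ ind ∧ PySem.Chars.isIn [':'] s ∧ (itemView indent cur).items ≠ [] then
          (itemView indent cur).insert (String.mk (PySem.Chars.strip (splitColon s).1)) (yamlValue (splitColon s).2)
        else itemView indent cur := by
  cases cur with
  | none => simp [itemView, PySem.Dict.empty]
  | some b =>
    obtain ⟨m, ks⟩ := b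
    simp only [Option.map_some]
    by_cases hc : PySem.Chars.isIn [':'] (PySem.Chars.strip (PySem.List.slice m.2 (some 2) none)) = true
    · have h1 : blockToItem indent (m, ks) =
          some (ks.foldl (stepKey indent)
            (PySem.Dict.empty.insert
              (String.mk (PySem.Chars.strip (splitColon (PySem.Chars.strip (PySem.List.slice m.2 (some 2) none))).1))
              (yamlValue (splitColon (PySem.Chars.strip (PySem.List.slice m.2 (some 2) none))).2))) := by
        simp [blockToItem, hc]
      have h2 : blockToItem indent (m, ks ++ [(ind, s)]) =
          some ((ks ++ [(ind, s)]).foldl (stepKey indent)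
            (PySem.Dict.empty.insert
              (String.mk (PySem.Chars.strip (splitColon (PySem.Chars.strip (PySem.List.slice m.2 (some 2) none))).1))
              (yamlValue (splitColon (PySem.Chars.strip (PySem.List.slice m.2 (some 2) none))).2))) := by
        simp [blockToItem, hc]
      have hne := foldl_stepKey_ne_nil indent ks
        (PySem.Dict.empty.insert
          (String.mk (PySem.Chars.strip (splitColon (PySem.Chars.strip (PySem.List.slice m.2 (some 2) none))).1))
          (yamlValue (splitColon (PySem.Chars.strip (PySem.List.slice m.2 (some 2) none))).2))
        (insert_items_ne_nil _ _ _)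
      simp only [itemView, h1, h2, Option.getD_some]
      rw [List.foldl_append]
      simp only [List.foldl_cons, List.foldl_nil]
      unfold stepKey
      split_ifs with ha hb hb
      · rfl
      · exact absurd ⟨ha.1, ha.2, hne⟩ hb
      · exact absurd ⟨hb.1, hb.2.1⟩ ha
      · rfl
    · have h1 : blockToItem indent (m, ks) = none := by simp [blockToItem, hc]
      have h2 : blockToItem indent (m, ks ++ [(ind, s)]) = none := by simp [blockToItem, hc]
      simp only [itemView, h1, h2, Option.getD_none]
      simp [PySem.Dict.empty]

theorem procA_eq (indent : Int) :
    ∀ body, (∀ p ∈ body, indent ≤ p.1) → ∀ cur res,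
      procA indent res (itemView indent cur) body
        = res ++ (splitBRec cur body).filterMap (blockToItem indent) := by
  intro body
  induction body with
  | nil =>
    intro _ cur res
    simp only [procA, splitBRec]
    rw [itemView_flush]
  | cons p rest ih =>
    intro hb cur res
    obtain ⟨ind, s⟩ := p
    have hind : indent ≤ ind := hb (ind, s) (by simp)
    have hrest : ∀ q ∈ rest, indent ≤ q.1 := fun q hq => hb q (by simp [hq])
    simp only [procA, splitBRec]
    by_cases hm : PySem.Chars.startswith s ['-', ' '] = true
    · rw [if_pos (show _ ∧ _ from ⟨hm, hind⟩), if_pos hm]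
      have hnew : (if PySem.Chars.isIn [':'] (PySem.Chars.strip (PySem.List.slice s (some 2) none)) = true then
          PySem.Dict.empty.insert
            (String.mk (PySem.Chars.strip (splitColon (PySem.Chars.strip (PySem.List.slice s (some 2) none))).1))
            (yamlValue (splitColon (PySem.Chars.strip (PySem.List.slice s (some 2) none))).2)
        else PySem.Dict.empty) = itemView indent (some ((ind, s), [])) := by
        simp only [itemView, blockToItem, List.foldl_nil]
        split_ifs with h <;> simp
      rw [hnew]
      rw [ih hrest (some ((ind, s), [])) _]
      rw [itemView_flush]
      simp [List.filterMap_append, List.append_assoc]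
    · rw [if_neg (fun hc => hm hc.1), if_neg hm]
      rw [← apply_ite (fun d : SDict => procA indent res d rest)
            (indent + 2 ≤ ind ∧ PySem.Chars.isIn [':'] s = true ∧ (itemView indent cur).items ≠ [])
            ((itemView indent cur).insert (String.mk (PySem.Chars.strip (splitColon s).1))
              (yamlValue (splitColon s).2))
            (itemView indent cur)]
      rw [← itemView_push indent cur ind s]
      rw [ih hrest (cur.map (fun b => (b.1, b.2 ++ [(ind, s)]))) res]

-- ===== VERDICT (by name: the statement is the Claim_ definition above) =====
theorem parse_resources_list_py_spec : Claim_equal_parse_resources_list_py := by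
  intro lines start_i indent _ _
  unfold Spec_parse_resources_list_py parse_resources_list_py parse_resources_list_py_alt splitBlocks
  simp only [loopA_eq, foldl_stepBlocks]
  rw [show (PySem.Dict.empty : SDict) = itemView indent none from rfl]
  rw [procA_eq indent _ (scanB_ge lines indent start_i [] (by simp)) none []]
  simp [splitBRec]
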